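-- pv_equiv track=rewrite | github.com/21A91A1255/Owlcoder3.0 | Difficulty: Basic/Alternative Sorting/alternative-sorting.py | alternateSort
-- ===== SOURCE A (Python) =====
-- def alternateSort(arr):
--     # Your code goes here
--     arr.sort()
--     l=[]
--     for i in range(len(arr)):
--         if(len(arr)>1):
--             l.append(arr[(len(arr)-i)-1])
--             l.append(arr[i])
--         if(i>=(len(arr)//2)-1):
--             break
--     if(len(arr)%2!=0):
--         l.append(arr[(len(arr)//2)])
--     return l
-- ===== SOURCE B (Python) =====
-- def alternateSort(arr):
--     arr.sort()
--     n = len(arr)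
--     bottom = arr[:n // 2]
--     top = arr[n // 2:][::-1]
--     result = []
--     for hi, lo in zip(top, bottom):
--         result.append(hi)
--         result.append(lo)
--     if n % 2 != 0:
--         result.append(top[-1])
--     return result
-- ===== Notes on version B (the rewrite author's own statement) =====
-- stated objective: alternative
-- what changed: Replaces A's single index-arithmetic loop with an early break by precomputing the two sorted half-slices (the top half reversed) and interleaving them with zip, appending the last element of the reversed top half (the middle) for odd length.
import Mathlib
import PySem

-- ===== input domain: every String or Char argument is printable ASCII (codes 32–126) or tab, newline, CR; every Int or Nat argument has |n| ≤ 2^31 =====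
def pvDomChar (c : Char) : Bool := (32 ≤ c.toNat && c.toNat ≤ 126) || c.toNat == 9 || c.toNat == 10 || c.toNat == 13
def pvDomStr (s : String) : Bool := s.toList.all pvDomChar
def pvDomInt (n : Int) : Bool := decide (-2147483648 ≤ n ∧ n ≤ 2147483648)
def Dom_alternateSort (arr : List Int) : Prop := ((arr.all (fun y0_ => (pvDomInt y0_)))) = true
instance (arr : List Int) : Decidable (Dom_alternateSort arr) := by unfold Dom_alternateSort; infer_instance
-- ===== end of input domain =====

-- B interleaves the two sorted half-slices via zip instead of A's index-arithmetic loop with break.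
-- Both versions sort in place in Python; the equivalence proved here is about the RETURN value.

-- ===== PORT A =====
-- 'for i in range(len(arr))' with 'break': fuel-counted recursion over the same state.
-- Indices arr[(len-i)-1] and arr[i] are always in range on the executed iterations, so pyGetD is exact.
def alternateSortLoopA (s : List Int) : Nat → Nat → List Int → List Int
  | _, 0, l => l
  | i, fuel+1, l =>
    let l := if s.length > 1 then
        l ++ [PySem.List.pyGetD s ((s.length : Int) - (i : Int) - 1) 0,
              PySem.List.pyGetD s (i : Int) 0]
      else l
    if (i : Int) ≥ (s.length : Int) / 2 - 1 then l
    else alternateSortLoopA s (i+1) fuel l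

def alternateSort (arr : List Int) : List Int :=
  let s := PySem.List.sorted arr (fun x => x) false   -- arr.sort()
  let l := alternateSortLoopA s 0 s.length []
  if (s.length : Int) % 2 ≠ 0 then l ++ [PySem.List.pyGetD s ((s.length : Int) / 2) 0] else l

-- ===== PORT B =====
def alternateSort_alt (arr : List Int) : List Int :=
  let s := PySem.List.sorted arr (fun x => x) false   -- arr.sort()
  let n := s.length
  let bottom := PySem.List.slice s none (some ((n : Int) / 2))              -- arr[:n//2]
  let top := (PySem.List.slice s (some ((n : Int) / 2)) none).reverse       -- arr[n//2:][::-1]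
  let result := (top.zip bottom).foldl (fun acc p => acc ++ [p.1, p.2]) []
  if (n : Int) % 2 ≠ 0 then result ++ [PySem.List.pyGetD top (-1) 0] else result

-- ===== PRECONDITION & SPEC =====
def Spec_alternateSort (arr : List Int) (out : List Int) : Prop := out = alternateSort_alt arr
instance (arr : List Int) (out : List Int) : Decidable (Spec_alternateSort arr out) := by unfold Spec_alternateSort; infer_instance

-- ===== CLAIM (what is proved, stated in full; the proofs are below) =====
def Claim_equal_alternateSort : Prop := ∀ (arr : List Int), Dom_alternateSort arr → Spec_alternateSort arr (alternateSort arr)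

-- ===== LEMMAS AND PROOFS =====

lemma natCast_half (n : Nat) : (n : Int) / 2 = ((n / 2 : Nat) : Int) := by
  omega

-- A's loop builds the flatMap of the remaining range up to n/2 - 1.
lemma loopA_eq (s : List Int) (h : 1 < s.length) :
    ∀ (c i : Nat) (l : List Int), i + c = s.length → i < s.length / 2 →
      alternateSortLoopA s i c l =
        l ++ (List.range' i (s.length / 2 - i)).flatMap
          (fun j => [s.getD (s.length - 1 - j) 0, s.getD j 0]) := by
  intro c
  induction c with
  | zero =>
    intro i l hc hi
    have : s.length / 2 ≤ s.length := Nat.div_le_self _ _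
    omega
  | succ c ih =>
    intro i l hc hi
    have hn2 : 1 ≤ s.length / 2 := by omega
    have hidx : ((s.length : Int) - (i : Int) - 1) = ((s.length - 1 - i : Nat) : Int) := by
      have : i < s.length := by omega
      push_cast [Nat.sub_sub]; omega
    simp only [alternateSortLoopA, h, if_pos, hidx, PySem.List.pyGetD_natCast, natCast_half]
    by_cases hb : (i : Int) ≥ ((s.length / 2 : Nat) : Int) - 1
    · have hieq : i = s.length / 2 - 1 := by omega
      rw [if_pos hb]
      subst hieq
      have h1 : s.length / 2 - (s.length / 2 - 1) = 1 := by omega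
      simp [h1, Nat.sub_sub]
    · rw [if_neg hb]
      have hi' : i + 1 < s.length / 2 := by
        have : ¬ ((s.length / 2 : Nat) : Int) - 1 ≤ (i : Int) := hb
        omega
      rw [ih (i+1) _ (by omega) hi']
      have hr : List.range' i (s.length / 2 - i) = i :: List.range' (i+1) (s.length / 2 - (i+1)) := by
        have h1 : s.length / 2 - i = (s.length / 2 - (i+1)) + 1 := by omega
        rw [h1, List.range'_succ]
      rw [hr]
      simp [Nat.sub_sub, List.append_assoc]

-- top = (s.drop (n/2)).reverse indexed: top[j] = s[n-1-j].
lemma top_getElem (s : List Int) (j : Nat) (hj : j < s.length - s.length / 2) :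
    ((s.drop (s.length / 2)).reverse)[j]'(by simp; omega) =
      s[s.length - 1 - j]'(by omega) := by
  have hhalf : s.length / 2 ≤ s.length := Nat.div_le_self _ _
  rw [List.getElem_reverse, List.getElem_drop]
  congr 1
  simp
  omega

-- zip of the two halves = the indexed pairs.
lemma zip_halves_eq (s : List Int) :
    (((s.drop (s.length / 2)).reverse).zip (s.take (s.length / 2))) =
      (List.range (s.length / 2)).map
        (fun j => (s.getD (s.length - 1 - j) 0, s.getD j 0)) := by
  have hhalf : s.length / 2 ≤ s.length := Nat.div_le_self _ _
  have h2 : s.length / 2 ≤ s.length - s.length / 2 := by omega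
  apply List.ext_getElem
  · simp; omega
  · intro j h1' h2'
    have hj : j < s.length / 2 := by simpa using h2'
    have hjn : j < s.length := by omega
    have hjt : j < s.length - s.length / 2 := by omega
    rw [List.getElem_zip, List.getElem_map, List.getElem_range]
    have ht := top_getElem s j hjt
    rw [ht, List.getElem_take]
    have e1 : s.getD (s.length - 1 - j) 0 = s[s.length - 1 - j]'(by omega) :=
      List.getD_eq_getElem s 0 (by omega)
    have e2 : s.getD j 0 = s[j] := List.getD_eq_getElem s 0 hjn
    rw [e1, e2]

-- The core identity, on the (sorted) list s.
lemma core_eq (s : List Int) :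
    (if (s.length : Int) % 2 ≠ 0 then
        alternateSortLoopA s 0 s.length [] ++ [PySem.List.pyGetD s ((s.length : Int) / 2) 0]
      else alternateSortLoopA s 0 s.length []) =
    (if ((s.length : Int)) % 2 ≠ 0 then
        (((PySem.List.slice s (some ((s.length : Int) / 2)) none).reverse).zip
            (PySem.List.slice s none (some ((s.length : Int) / 2)))).foldl
          (fun acc p => acc ++ [p.1, p.2]) [] ++
          [PySem.List.pyGetD ((PySem.List.slice s (some ((s.length : Int) / 2)) none).reverse) (-1) 0]
      else
        (((PySem.List.slice s (some ((s.length : Int) / 2)) none).reverse).zip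
            (PySem.List.slice s none (some ((s.length : Int) / 2)))).foldl
          (fun acc p => acc ++ [p.1, p.2]) []) := by
  rw [natCast_half]
  rw [PySem.List.slice_from_natCast, PySem.List.slice_to_natCast]
  have hfold :
      (((s.drop (s.length / 2)).reverse).zip (s.take (s.length / 2))).foldl
          (fun acc p => acc ++ [p.1, p.2]) [] =
        (List.range (s.length / 2)).flatMap
          (fun j => [s.getD (s.length - 1 - j) 0, s.getD j 0]) := by
    rw [PySem.List.foldl_append_eq_flatMap (g := fun p : Int × Int => [p.1, p.2])]
    rw [zip_halves_eq]
    simp [List.flatMap_map]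
  have hloop : alternateSortLoopA s 0 s.length [] =
      (List.range (s.length / 2)).flatMap
        (fun j => [s.getD (s.length - 1 - j) 0, s.getD j 0]) := by
    by_cases h1 : 1 < s.length
    · have := loopA_eq s h1 s.length 0 [] (by omega) (by omega)
      simpa [List.range_eq_range'] using this
    · rcases s with _ | ⟨a, _ | ⟨b, t⟩⟩
      · simp [alternateSortLoopA]
      · norm_num [alternateSortLoopA]
      · simp at h1
  by_cases hodd : (s.length : Int) % 2 ≠ 0
  · rw [if_pos hodd, if_pos hodd, hfold, hloop]
    congr 1
    have hoddn : s.length % 2 = 1 := by omega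
    have hlen : (s.drop (s.length / 2)).reverse.length = s.length - s.length / 2 := by
      simp
    have hne : (s.drop (s.length / 2)).reverse ≠ [] := by
      rw [← List.length_pos_iff, hlen]; omega
    rw [PySem.List.pyGetD_neg_one _ _ hne, List.getLast_eq_getElem]
    have hj : (s.drop (s.length / 2)).reverse.length - 1 < s.length - s.length / 2 := by
      omega
    have htop := top_getElem s ((s.drop (s.length / 2)).reverse.length - 1) hj
    rw [htop, PySem.List.pyGetD_natCast, List.getD_eq_getElem s 0 (by omega)]
    have hidx2 : s.length / 2 = s.length - 1 - ((s.drop (s.length / 2)).reverse.length - 1) := by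
      rw [hlen]; omega
    simp only [← hidx2]
  · rw [if_neg hodd, if_neg hodd, hfold, hloop]

-- ===== VERDICT (by name: the statement is the Claim_ definition above) =====
theorem alternateSort_spec : Claim_equal_alternateSort := by
  intro arr _
  unfold Spec_alternateSort alternateSort alternateSort_alt
  exact core_eq (PySem.List.sorted arr (fun x => x) false)
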